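-- pv_equiv track=rewrite | github.com/maxcohen31/Codewars-Solutions | Codewars/Censored_string_7_kyu.py | uncensor
-- ===== SOURCE A (Python) =====
-- def uncensor(infected: str, discovered: str) -> str:
--     result = infected[:]
--     asterisk_counter = 0
--
--     if discovered == "":
--         return infected
--     else:
--         for idx in range(len(result)):
--             if result[idx] == '*':
--                 result = result[:idx] + discovered[asterisk_counter] + result[idx+1:]
--                 asterisk_counter += 1
--     return result
-- ===== SOURCE B (Python) =====
-- def uncensor(infected: str, discovered: str) -> str:
--     if discovered == "":
--         return infected
--     parts = infected.split('*')
--     pieces = [parts[0]]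
--     for i, part in enumerate(parts[1:]):
--         pieces.append(discovered[i])
--         pieces.append(part)
--     return ''.join(pieces)
-- ===== Notes on version B (the rewrite author's own statement) =====
-- stated objective: faster
-- what changed: B splits the string on '*' once and interleaves the segments with successive discovered characters, instead of rescanning and rebuilding the whole string by slicing at every asterisk.
import Mathlib
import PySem

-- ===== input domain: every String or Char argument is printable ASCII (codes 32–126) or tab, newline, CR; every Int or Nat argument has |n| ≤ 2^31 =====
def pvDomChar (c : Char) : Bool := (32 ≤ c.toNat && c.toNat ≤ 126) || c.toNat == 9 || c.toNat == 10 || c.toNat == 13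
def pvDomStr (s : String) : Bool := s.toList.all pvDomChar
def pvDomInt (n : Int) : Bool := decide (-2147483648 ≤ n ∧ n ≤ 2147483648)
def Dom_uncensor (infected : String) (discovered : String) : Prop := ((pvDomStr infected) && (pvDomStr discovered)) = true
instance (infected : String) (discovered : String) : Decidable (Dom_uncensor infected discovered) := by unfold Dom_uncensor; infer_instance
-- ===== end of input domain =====

-- B replaces A's rescan-and-reslice loop by one split on '*' interleaved with the discovered characters.

-- ===== PORT A =====
-- one iteration of A's `for idx in range(len(result))` loop; state = (result, asterisk_counter)
def pvStepA (disc : List Char) (st : List Char × Nat) (idx : Int) : List Char × Nat :=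
  match PySem.List.pyGet? st.1 idx with
  | some c =>
    if c = '*' then
      match PySem.List.pyGet? disc (st.2 : Int) with
      | some e => (PySem.List.slice st.1 none (some idx) ++ [e] ++ PySem.List.slice st.1 (some (idx + 1)) none, st.2 + 1)
      | none => st   -- Python raises IndexError here; excluded by Pre_uncensor
    else st
  | none => st       -- unreachable: idx < len(result)

def uncensor (infected : String) (discovered : String) : String :=
  let result := infected.toList          -- result = infected[:]
  if discovered = "" then infected
  else
    String.ofList ((PySem.List.pyRange 0 (result.length : Int) 1).foldl (pvStepA discovered.toList) (result, 0)).1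

-- ===== PORT B =====
-- the two appends of one iteration of Source B's loop: [discovered[i], part]
def pvPieceB (disc : List Char) (ip : Int × List Char) : List (List Char) :=
  match PySem.List.pyGet? disc ip.1 with
  | some e => [[e], ip.2]
  | none => [ip.2]   -- Python raises IndexError here; excluded by Pre_uncensor

def uncensor_alt (infected : String) (discovered : String) : String :=
  if discovered = "" then infected
  else
    let parts := PySem.Chars.splitOn infected.toList ['*']
    let pieces := (PySem.List.enumerate (parts.drop 1) 0).foldl
      (fun acc ip => acc ++ pvPieceB discovered.toList ip) [parts.headD []]  -- parts[0]: split never returns []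
    String.ofList (PySem.Chars.join [] pieces)

-- ===== PRECONDITION & SPEC =====
-- Pre_ excludes exactly the inputs where A raises IndexError: discovered nonempty but shorter
-- than the number of asterisks (B raises there too).
def Pre_uncensor (infected : String) (discovered : String) : Prop :=
  discovered = "" ∨ infected.toList.count '*' ≤ discovered.toList.length
instance (infected : String) (discovered : String) : Decidable (Pre_uncensor infected discovered) := by unfold Pre_uncensor; infer_instance
def pvWitness_uncensor : String × String := ("d*nger*us", "ae")

def Spec_uncensor (infected : String) (discovered : String) (out : String) : Prop := out = uncensor_alt infected discovered
instance (infected : String) (discovered : String) (out : String) : Decidable (Spec_uncensor infected discovered out) := by unfold Spec_uncensor; infer_instance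

-- ===== CLAIM (what is proved, stated in full; the proofs are below) =====
def Claim_equal_uncensor : Prop := ∀ (infected : String) (discovered : String), Dom_uncensor infected discovered → Pre_uncensor infected discovered → Spec_uncensor infected discovered (uncensor infected discovered)

-- ===== LEMMAS AND PROOFS =====

-- the common value: each '*' replaced by the next discovered character
def pvRepl : List Char → List Char → List Char
  | [], _ => []
  | c :: t, d =>
    if c = '*' then
      match d with
      | e :: d' => e :: pvRepl t d'
      | [] => c :: t        -- never consulted under the count bound
    else c :: pvRepl t d

-- interleave the post-asterisk segments with discovered characters
def pvGlue : List (List Char) → List Char → List Char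
  | [], _ => []
  | p :: ps, d =>
    match d with
    | e :: d' => e :: (p ++ pvGlue ps d')
    | [] => p             -- never consulted under the count bound

-- A's loop, having processed `pre` (with `cnt` asterisks replaced), rewrites `suf` to pvRepl
lemma pvLoopA (disc : List Char) : ∀ (suf pre : List Char) (cnt : Nat),
    suf.count '*' + cnt ≤ disc.length →
    ((PySem.List.pyRange (pre.length : Int) ((pre.length + suf.length : Nat) : Int) 1).foldl
        (pvStepA disc) (pre ++ suf, cnt)).1 = pre ++ pvRepl suf (disc.drop cnt) := by
  intro suf
  induction suf with
  | nil =>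
    intro pre cnt h
    rw [PySem.List.pyRange_one_eq_nil (by simp)]
    simp [pvRepl]
  | cons c t ih =>
    intro pre cnt h
    rw [PySem.List.pyRange_one_cons (by push_cast; simp)]
    rw [List.foldl_cons]
    have hgetc : PySem.List.pyGet? (pre ++ c :: t) ((pre.length : Nat) : Int) = some c := by
      rw [PySem.List.pyGet?_natCast]
      simp
    by_cases hc : c = '*'
    · subst hc
      have hcnt : cnt < disc.length := by simp at h; omega
      have hgete : PySem.List.pyGet? disc ((cnt : Nat) : Int) = some disc[cnt] := by
        rw [PySem.List.pyGet?_natCast]; exact List.getElem?_eq_getElem hcnt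
      have hstep : pvStepA disc (pre ++ '*' :: t, cnt) ((pre.length : Nat) : Int)
          = ((pre ++ [disc[cnt]]) ++ t, cnt + 1) := by
        simp only [pvStepA, hgetc, hgete]
        rw [PySem.List.slice_to _ (by positivity)]
        rw [PySem.List.slice_from _ (by positivity)]
        have h1 : ((pre.length : Int)).toNat = pre.length := by simp
        have h2 : ((pre.length : Int) + 1).toNat = pre.length + 1 := by omega
        rw [h1, h2]
        simp
      rw [hstep]
      have ih' := ih (pre ++ [disc[cnt]]) (cnt + 1) (by simp at h ⊢; omega)
      rw [show ((pre.length : Int) + 1) = (((pre ++ [disc[cnt]]).length : Nat) : Int) by simp]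
      rw [show ((pre.length + ('*' :: t).length : Nat) : Int) = (((pre ++ [disc[cnt]]).length + t.length : Nat) : Int) by simp; omega]
      rw [ih']
      rw [List.drop_eq_getElem_cons hcnt]
      simp [pvRepl]
    · have hstep : pvStepA disc (pre ++ c :: t, cnt) ((pre.length : Nat) : Int)
          = (pre ++ c :: t, cnt) := by
        simp [pvStepA, hc]
      rw [hstep]
      have ih' := ih (pre ++ [c]) cnt (by simp [hc] at h ⊢; omega)
      rw [show pre ++ c :: t = (pre ++ [c]) ++ t by simp]
      rw [show ((pre.length : Int) + 1) = (((pre ++ [c]).length : Nat) : Int) by simp]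
      rw [show ((pre.length + (c :: t).length : Nat) : Int) = (((pre ++ [c]).length + t.length : Nat) : Int) by simp; omega]
      rw [ih']
      simp [pvRepl, hc]

lemma pvGo (c : Char) : ∀ (fuel : Nat) (l cur : List Char) (acc : List (List Char)),
    l.length ≤ fuel →
    PySem.Chars.splitOn.go [c] fuel l cur acc
      = acc.reverse ++ List.modifyHead (cur.reverse ++ ·) (List.splitOnP (· == c) l) := by
  intro fuel
  induction fuel with
  | zero =>
    intro l cur acc h
    have hl : l = [] := by cases l <;> simp_all
    subst hl
    simp [PySem.Chars.splitOn.go, List.splitOnP_nil]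
  | succ f ih =>
    intro l cur acc h
    cases l with
    | nil => simp [PySem.Chars.splitOn.go, List.splitOnP_nil]
    | cons a rest =>
      rw [PySem.Chars.splitOn.go]
      by_cases hac : a = c
      · subst hac
        have hpre : List.isPrefixOf [a] (a :: rest) = true := by simp [List.isPrefixOf]
        rw [if_pos hpre]
        simp only [List.length_cons, List.length_nil, List.drop_succ_cons, List.drop_zero]
        rw [ih rest [] (cur.reverse :: acc) (by simpa using Nat.lt_succ_iff.mp (by simpa using h))]
        rw [List.splitOnP_cons]
        simp
        exact congrFun List.modifyHead_id _
      · have hac' : c ≠ a := fun h' => hac h'.symm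
        have hpre : ¬ (List.isPrefixOf [c] (a :: rest) = true) := by
          simp [List.isPrefixOf, hac']
        rw [if_neg hpre]
        rw [ih rest (a :: cur) acc (by simpa using Nat.lt_succ_iff.mp (by simpa using h))]
        rw [List.splitOnP_cons]
        have hne := List.splitOnP_ne_nil (· == c) rest
        obtain ⟨hd, tl, hsp⟩ := List.exists_cons_of_ne_nil hne
        rw [hsp]
        simp [hac, List.modifyHead]

lemma pvSplitOn_single (c : Char) (s : List Char) :
    PySem.Chars.splitOn s [c] = List.splitOnP (· == c) s := by
  rw [PySem.Chars.splitOn, pvGo c (s.length + 1) s [] [] (by omega)]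
  simp
  exact congrFun List.modifyHead_id _

lemma pvLen_splitOnP (s : List Char) :
    (List.splitOnP (· == '*') s).length = s.count '*' + 1 := by
  induction s with
  | nil => simp
  | cons c t ih =>
    rw [List.splitOnP_cons]
    by_cases hc : c = '*'
    · simp [hc, ih]
    · simp [hc, List.length_modifyHead, ih]

-- B's split-and-interleave result, characterised against the segments of s
lemma pvReplGlue : ∀ (s d : List Char), s.count '*' ≤ d.length →
    pvRepl s d = (List.splitOnP (· == '*') s).headI
      ++ pvGlue (List.splitOnP (· == '*') s).tail d := by
  intro s
  induction s with
  | nil => intro d h; simp [pvRepl, List.splitOnP_nil, pvGlue]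
  | cons c t ih =>
    intro d h
    rw [List.splitOnP_cons]
    by_cases hc : c = '*'
    · subst hc
      simp only [List.count_cons] at h
      cases d with
      | nil => simp at h
      | cons e d' =>
        simp only [beq_self_eq_true]
        have hne := List.splitOnP_ne_nil (· == '*') t
        obtain ⟨hd, tl, hsp⟩ := List.exists_cons_of_ne_nil hne
        have ih' := ih d' (by simp at h; omega)
        rw [hsp] at ih' ⊢
        simp [pvRepl, pvGlue, ih']
    · have hne := List.splitOnP_ne_nil (· == '*') t
      obtain ⟨hd, tl, hsp⟩ := List.exists_cons_of_ne_nil hne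
      have ih' := ih d (by simp [hc] at h ⊢; omega)
      rw [hsp] at ih' ⊢
      simp [pvRepl, hc, List.modifyHead, ih']

lemma pvJoinNil : ∀ (l : List (List Char)), PySem.Chars.join [] l = l.flatten := by
  intro l
  induction l with
  | nil => simp [PySem.Chars.join_nil]
  | cons p rest ih =>
    cases rest with
    | nil => simp [PySem.Chars.join_singleton]
    | cons q r => rw [PySem.Chars.join_cons_cons]; simp at ih ⊢; rw [ih]

-- Source B's loop over enumerate(parts[1:]) computes pvGlue
lemma pvEnumFold (d : List Char) : ∀ (tl : List (List Char)) (j : Nat) (acc : List (List Char)),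
    tl.length + j ≤ d.length →
    PySem.Chars.join [] ((PySem.List.enumerate tl (j : Int)).foldl
        (fun acc ip => acc ++ pvPieceB d ip) acc)
      = PySem.Chars.join [] acc ++ pvGlue tl (d.drop j) := by
  intro tl
  induction tl with
  | nil => intro j acc h; simp [PySem.List.enumerate, pvGlue]
  | cons p ps ih =>
    intro j acc h
    have hj : j < d.length := by simp at h; omega
    rw [show PySem.List.enumerate (p :: ps) (j : Int) = ((j : Int), p) :: PySem.List.enumerate ps ((j : Int) + 1) from rfl]
    rw [List.foldl_cons]
    rw [show ((j : Int) + 1) = ((j + 1 : Nat) : Int) by push_cast; ring]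
    rw [ih (j + 1) _ (by simp at h ⊢; omega)]
    have hget : PySem.List.pyGet? d ((j : Int)) = some d[j] := by
      rw [PySem.List.pyGet?_natCast]
      exact List.getElem?_eq_getElem hj
    rw [List.drop_eq_getElem_cons hj]
    simp only [pvPieceB, hget, pvGlue, pvJoinNil]
    simp

-- ===== VERDICT (by name: the statement is the Claim_ definition above) =====
theorem uncensor_spec : Claim_equal_uncensor := by
  intro inf disc _ hpre
  unfold Spec_uncensor uncensor uncensor_alt
  by_cases hd : disc = ""
  · simp [hd]
  · simp only [if_neg hd]
    have hcount : inf.toList.count '*' ≤ disc.toList.length := hpre.resolve_left hd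
    -- A's side reduces to pvRepl
    have hA := pvLoopA disc.toList inf.toList [] 0 (by simpa using hcount)
    simp only [List.length_nil, Nat.cast_zero, List.nil_append, List.drop_zero, Nat.zero_add] at hA
    -- B's side reduces to headI ++ pvGlue
    rw [pvSplitOn_single]
    have hne := List.splitOnP_ne_nil (· == '*') inf.toList
    obtain ⟨hd0, tl, hsp⟩ := List.exists_cons_of_ne_nil hne
    have hlen := pvLen_splitOnP inf.toList
    rw [hsp] at hlen
    simp only [List.length_cons] at hlen
    have htl : tl.length + 0 ≤ disc.toList.length := by omega
    have hB := pvEnumFold disc.toList tl 0 [hd0] htl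
    rw [hsp]
    simp only [List.drop_succ_cons, List.drop_zero, List.headD_cons, Nat.cast_zero] at hB ⊢
    rw [hB, PySem.Chars.join_singleton]
    rw [hA]
    rw [pvReplGlue inf.toList disc.toList hcount, hsp]
    simp
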